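-- pv_equiv track=rewrite | github.com/kh277/BOJ | 백준/Gold/1229. 육각수/육각수.py | make_hexa
-- ===== SOURCE A (Python) =====
-- def make_hexa(limit: int) -> list:
--     temp = []
--
--     index = 1
--     n = 0
--     while True:
--         n = 2 * index**2 - index    # 점화식
--
--         # 탈출조건
--         if n > limit:
--             break
--
--         temp.append(n)
--         index += 1
--
--     return temp
-- ===== SOURCE B (Python) =====
-- def make_hexa(limit: int) -> list:
--     # Binary search for the largest index k with 2*k*k - k <= limit,
--     # then generate the list directly (no scan-until-exceed).
--     if limit < 1:
--         return []
--     lo, hi = 0, limit + 1          # invariant: hexa(lo) <= limit < hexa(hi)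
--     while hi - lo > 1:
--         mid = (lo + hi) // 2
--         if 2 * mid * mid - mid <= limit:
--             lo = mid
--         else:
--             hi = mid
--     return [2 * i * i - i for i in range(1, lo + 1)]
-- ===== Notes on version B (the rewrite author's own statement) =====
-- stated objective: alternative
-- what changed: Replaces the scan-until-exceed while-loop with a binary search for the largest hexagonal index k with 2k^2-k <= limit, then generates the k terms directly from the closed formula.
import Mathlib
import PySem

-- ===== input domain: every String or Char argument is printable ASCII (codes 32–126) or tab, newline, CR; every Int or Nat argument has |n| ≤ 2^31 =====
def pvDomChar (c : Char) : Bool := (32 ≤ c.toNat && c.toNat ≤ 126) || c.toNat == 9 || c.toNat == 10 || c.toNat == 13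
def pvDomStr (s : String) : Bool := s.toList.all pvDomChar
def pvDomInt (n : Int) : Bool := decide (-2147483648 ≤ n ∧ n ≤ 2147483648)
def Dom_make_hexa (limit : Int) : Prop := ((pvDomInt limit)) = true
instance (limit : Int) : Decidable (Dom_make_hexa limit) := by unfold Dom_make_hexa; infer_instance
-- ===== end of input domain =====

-- B replaces A's scan-until-exceed loop by a binary search for the last hexagonal
-- index ≤ limit followed by direct generation (objective: alternative algorithm).

-- ===== PORT A =====
-- A's 'while True' loop: append 2*index^2 - index until it exceeds limit.
-- Fuel makes the recursion structural; fuel sufficiency is proved below (the loop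
-- runs at most limit+1 times since 2*i^2-i ≥ i for i ≥ 1).
def hexLoopA (limit : Int) : Nat → List Int → Int → List Int
  | 0, temp, _ => temp
  | fuel + 1, temp, index =>
    let n := 2 * index ^ 2 - index
    if n > limit then temp
    else hexLoopA limit fuel (temp ++ [n]) (index + 1)

def make_hexa (limit : Int) : List Int :=
  hexLoopA limit (limit.toNat + 1) [] 1

-- ===== PORT B =====
-- Source B's binary-search loop: invariant hexa(lo) ≤ limit < hexa(hi); the gap
-- shrinks every iteration, so fuel (hi-lo).toNat suffices (proved below).
def bsLoop (limit : Int) : Nat → Int → Int → Int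
  | 0, lo, _ => lo
  | fuel + 1, lo, hi =>
    if hi - lo > 1 then
      let mid := PySem.Int.floordiv (lo + hi) 2
      if 2 * mid * mid - mid ≤ limit then bsLoop limit fuel mid hi
      else bsLoop limit fuel lo mid
    else lo

def make_hexa_alt (limit : Int) : List Int :=
  if limit < 1 then []
  else
    (PySem.List.pyRange 1 (bsLoop limit (limit + 1).toNat 0 (limit + 1) + 1) 1).map
      (fun i => 2 * i * i - i)

-- ===== PRECONDITION & SPEC =====
def Spec_make_hexa (limit : Int) (out : List Int) : Prop := out = make_hexa_alt limit
instance (limit : Int) (out : List Int) : Decidable (Spec_make_hexa limit out) := by unfold Spec_make_hexa; infer_instance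

-- ===== CLAIM (what is proved, stated in full; the proofs are below) =====
def Claim_equal_make_hexa : Prop := ∀ (limit : Int), Dom_make_hexa limit → Spec_make_hexa limit (make_hexa limit)

-- ===== LEMMAS AND PROOFS =====

-- strict monotonicity of the hexagonal formula on nonnegative arguments
theorem hex_strict_mono {a b : Int} (h0 : 0 ≤ a) (hab : a < b) :
    2 * a * a - a < 2 * b * b - b := by nlinarith

theorem hex_mono {a b : Int} (h0 : 0 ≤ a) (hab : a ≤ b) :
    2 * a * a - a ≤ 2 * b * b - b := by
  rcases eq_or_lt_of_le hab with h | h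
  · subst h; omega
  · exact le_of_lt (hex_strict_mono h0 h)

-- the binary search returns the largest index r with 2r²-r ≤ limit
theorem bsLoop_correct (limit : Int) :
    ∀ (fuel : Nat) (lo hi : Int), (hi - lo).toNat ≤ fuel + 1 → 0 ≤ lo → lo < hi →
    2 * lo * lo - lo ≤ limit → limit < 2 * hi * hi - hi →
    0 ≤ bsLoop limit fuel lo hi ∧
    2 * bsLoop limit fuel lo hi * bsLoop limit fuel lo hi - bsLoop limit fuel lo hi ≤ limit ∧
    limit < 2 * (bsLoop limit fuel lo hi + 1) * (bsLoop limit fuel lo hi + 1) - (bsLoop limit fuel lo hi + 1) := by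
  intro fuel
  induction fuel with
  | zero =>
    intro lo hi hfu h0 hlt hlo hhi
    have : hi = lo + 1 := by omega
    subst this
    simp only [bsLoop]
    exact ⟨h0, hlo, hhi⟩
  | succ m ih =>
    intro lo hi hfu h0 hlt hlo hhi
    rw [bsLoop]
    by_cases hgap : hi - lo > 1
    · simp only [hgap, if_true]
      have hmlo := (PySem.Int.le_floordiv_iff_mul_le (a := lo + hi) (b := 2) (q := lo + 1) (by omega)).mpr (by omega)
      have hmhi := (PySem.Int.floordiv_lt_iff_lt_mul (a := lo + hi) (b := 2) (q := hi) (by omega)).mpr (by omega)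
      set mid := PySem.Int.floordiv (lo + hi) 2 with hmid
      by_cases hc : 2 * mid * mid - mid ≤ limit
      · simp only [hc, if_true]
        exact ih mid hi (by omega) (by omega) (by omega) hc hhi
      · simp only [hc, if_false]
        exact ih lo mid (by omega) h0 (by omega) hlo (by omega)
    · simp only [hgap, if_false]
      have : hi = lo + 1 := by omega
      subst this
      exact ⟨h0, hlo, hhi⟩

-- A's loop, characterised against the exact cut-off index r
theorem hexLoopA_eq (limit r : Int) (h0 : 0 ≤ r)
    (hr : 2 * r * r - r ≤ limit) (hr1 : limit < 2 * (r + 1) * (r + 1) - (r + 1)) :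
    ∀ (fuel : Nat) (index : Int) (temp : List Int), 1 ≤ index → (r + 2 - index).toNat ≤ fuel →
    hexLoopA limit fuel temp index =
      temp ++ (PySem.List.pyRange index (r + 1) 1).map (fun i => 2 * i ^ 2 - i) := by
  intro fuel
  induction fuel with
  | zero =>
    intro index temp h1 hfu
    have hir : r + 2 ≤ index := by omega
    simp only [hexLoopA]
    have : PySem.List.pyRange index (r + 1) 1 = [] := by
      rw [PySem.List.pyRange_one]
      have : (r + 1 - index).toNat = 0 := by omega
      simp [this]
    simp [this]
  | succ m ih =>
    intro index temp h1 hfu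
    rw [hexLoopA]
    by_cases hbr : index ≤ r
    · have hsmall : ¬ (2 * index ^ 2 - index > limit) := by
        have h := hex_mono (a := index) (b := r) (by omega) hbr
        have hsq : 2 * index ^ 2 - index = 2 * index * index - index := by ring
        rw [gt_iff_lt, not_lt, hsq]; linarith
      simp only [hsmall, if_false]
      rw [ih (index + 1) (temp ++ [2 * index ^ 2 - index]) (by omega) (by omega)]
      conv_rhs => rw [PySem.List.pyRange_one_cons (by omega : index < r + 1)]
      simp [List.append_assoc]
    · have hbig : 2 * index ^ 2 - index > limit := by
        have h := hex_mono (a := r + 1) (b := index) (by omega) (by omega)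
        have hsq : 2 * index ^ 2 - index = 2 * index * index - index := by ring
        rw [gt_iff_lt, hsq]; linarith
      simp only [hbig, if_true]
      have : PySem.List.pyRange index (r + 1) 1 = [] := by
        rw [PySem.List.pyRange_one]
        have : (r + 1 - index).toNat = 0 := by omega
        simp [this]
      simp [this]

theorem make_hexa_spec_aux (limit : Int) : make_hexa limit = make_hexa_alt limit := by
  unfold make_hexa make_hexa_alt
  by_cases hlim : limit < 1
  · simp only [hlim, if_true]
    have h1 : limit.toNat = 0 := by omega
    rw [h1]
    simp only [hexLoopA]
    norm_num
    omega
  · simp only [hlim, if_false]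
    have hwit := bsLoop_correct limit (limit + 1).toNat 0 (limit + 1) (by omega) (by omega)
      (by omega) (by omega) (by nlinarith)
    set r := bsLoop limit (limit + 1).toNat 0 (limit + 1) with hrdef
    obtain ⟨h0, hr, hr1⟩ := hwit
    have hrlim : r ≤ limit := by nlinarith
    rw [hexLoopA_eq limit r h0 hr hr1 (limit.toNat + 1) 1 [] (by omega) (by omega)]
    rw [List.nil_append]
    exact List.map_congr_left (fun x _ => by ring)

-- ===== VERDICT (by name: the statement is the Claim_ definition above) =====
theorem make_hexa_spec : Claim_equal_make_hexa := by
  intro limit _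
  exact make_hexa_spec_aux limit
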